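-- pv_equiv track=rewrite | github.com/blazejosinski/advent-of-code | aoc2020/day7.py | compute_dfs
-- ===== SOURCE A (Python) =====
-- def compute_dfs(edges_lists):
--     graph = {}
--     for edges in edges_lists:
--         for inv, outv in edges:
--             l = graph.get(inv, [])
--             l.append(outv)
--             graph[inv] = l
--
--     bfs = ["shiny gold"]
--     visited = set(["shiny gold"])
--     while bfs:
--         v = bfs.pop()
--         for neighbour in graph.get(v, []):
--             if neighbour not in visited:
--                 visited.add(neighbour)
--                 bfs.append(neighbour)
--     return len(visited)-1
-- ===== SOURCE B (Python) =====
-- def compute_dfs(edges_lists):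
--     pairs = [p for edges in edges_lists for p in edges]
--     visited = {"shiny gold"}
--     while True:
--         added = {outv for inv, outv in pairs
--                  if inv in visited and outv not in visited}
--         if not added:
--             return len(visited) - 1
--         visited |= added
-- ===== Notes on version B (the rewrite author's own statement) =====
-- stated objective: alternative
-- what changed: Replaces A's reverse-adjacency dict plus explicit stack DFS with a dict-free round-based saturation: repeatedly add every edge target whose source is already reached until a whole pass adds nothing, then return the count minus one.
import Mathlib
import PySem

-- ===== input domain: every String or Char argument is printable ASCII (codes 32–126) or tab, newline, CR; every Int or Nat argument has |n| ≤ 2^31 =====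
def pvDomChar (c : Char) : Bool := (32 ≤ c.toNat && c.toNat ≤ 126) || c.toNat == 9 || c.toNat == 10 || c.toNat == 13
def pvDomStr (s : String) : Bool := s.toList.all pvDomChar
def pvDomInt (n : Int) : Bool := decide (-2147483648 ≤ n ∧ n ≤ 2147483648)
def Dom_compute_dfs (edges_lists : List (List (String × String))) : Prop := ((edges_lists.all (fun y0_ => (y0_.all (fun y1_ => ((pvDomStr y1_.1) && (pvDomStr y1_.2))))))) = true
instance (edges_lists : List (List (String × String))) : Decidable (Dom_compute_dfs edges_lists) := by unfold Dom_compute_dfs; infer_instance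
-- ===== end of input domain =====

-- B replaces A's reverse-adjacency dict + explicit stack traversal by a dict-free
-- round-based saturation loop (alternative decomposition; no speed claim).
-- Both while-loops are ported with a fuel guard (pairs+1) that the proofs show is never exhausted.

-- ===== PORT A =====
-- the inner 'for neighbour in graph.get(v, []):' body
def pvVisitA (st : List String × PySem.Set String) (n : String) : List String × PySem.Set String :=
  if st.2.contains n then st else (st.1 ++ [n], PySem.Set.add st.2 n)

-- 'while bfs: v = bfs.pop(); for neighbour …' (fuel only makes the loop total; proved sufficient below)
def pvLoopA (g : PySem.Dict String (List String)) : Nat → List String → PySem.Set String → PySem.Set String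
  | 0, _, visited => visited
  | fuel + 1, bfs, visited =>
    match PySem.List.pop? bfs with
    | none => visited
    | some (v, rest) =>
      let st := (g.getD v []).foldl pvVisitA (rest, visited)
      pvLoopA g fuel st.1 st.2

def compute_dfs (edges_lists : List (List (String × String))) : Int :=
  let graph : PySem.Dict String (List String) :=
    edges_lists.foldl
      (fun g edges => edges.foldl (fun g e => g.insert e.1 (g.getD e.1 [] ++ [e.2])) g)
      PySem.Dict.empty
  let visited := pvLoopA graph (edges_lists.flatten.length + 1) ["shiny gold"] (PySem.Set.ofList ["shiny gold"])
  (visited.length : Int) - 1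

-- ===== PORT B =====
-- added = {outv for inv, outv in pairs if inv in visited and outv not in visited}
def pvRoundB (pairs : List (String × String)) (visited : PySem.Set String) : PySem.Set String :=
  pairs.foldl
    (fun acc e => if visited.contains e.1 && !visited.contains e.2 then PySem.Set.add acc e.2 else acc)
    PySem.Set.empty

-- 'while True: … if not added: break; visited |= added' (fuel only makes the loop total; proved sufficient below)
def pvLoopB (pairs : List (String × String)) : Nat → PySem.Set String → PySem.Set String
  | 0, visited => visited
  | fuel + 1, visited =>
    let added := pvRoundB pairs visited
    if added = [] then visited else pvLoopB pairs fuel (PySem.Set.union visited added)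

def compute_dfs_alt (edges_lists : List (List (String × String))) : Int :=
  let pairs := edges_lists.flatMap (fun edges => edges)
  let visited := pvLoopB pairs (pairs.length + 1) (PySem.Set.ofList ["shiny gold"])
  (visited.length : Int) - 1

-- ===== PRECONDITION & SPEC =====
def Spec_compute_dfs (edges_lists : List (List (String × String))) (out : Int) : Prop := out = compute_dfs_alt edges_lists
instance (edges_lists : List (List (String × String))) (out : Int) : Decidable (Spec_compute_dfs edges_lists out) := by unfold Spec_compute_dfs; infer_instance

-- ===== CLAIM (what is proved, stated in full; the proofs are below) =====
def Claim_equal_compute_dfs : Prop := ∀ (edges_lists : List (List (String × String))), Dom_compute_dfs edges_lists → Spec_compute_dfs edges_lists (compute_dfs edges_lists)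

-- ===== LEMMAS AND PROOFS =====

inductive pvReach (P : List (String × String)) : String → Prop
  | gold : pvReach P "shiny gold"
  | step {y x : String} : pvReach P y → (y, x) ∈ P → pvReach P x

theorem pvClosed_char (P : List (String × String)) (vis : List String)
    (hgold : "shiny gold" ∈ vis)
    (hclosed : ∀ u ∈ vis, ∀ w, (u, w) ∈ P → w ∈ vis)
    (hreach : ∀ x ∈ vis, pvReach P x) :
    ∀ x, x ∈ vis ↔ pvReach P x := by
  intro x
  constructor
  · exact hreach x
  · intro h
    induction h with
    | gold => exact hgold
    | step hy hmem ih => exact hclosed _ ih _ hmem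

-- all node names a visited set can ever contain
def pvNodes (P : List (String × String)) : List String :=
  PySem.Set.ofList ("shiny gold" :: P.map Prod.snd)

theorem pvLen_le_nodes (P : List (String × String)) (vis : List String)
    (hnd : vis.Nodup) (hsub : ∀ x ∈ vis, x ∈ "shiny gold" :: P.map Prod.snd) :
    vis.length ≤ (pvNodes P).length := by
  calc vis.length = vis.toFinset.card := (List.toFinset_card_of_nodup hnd).symm
    _ ≤ (pvNodes P).toFinset.card := by
        apply Finset.card_le_card
        intro x hx
        simp only [List.mem_toFinset] at *
        simp only [pvNodes, PySem.Set.mem_ofList]; exact hsub x hx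
    _ = (pvNodes P).length := List.toFinset_card_of_nodup (by simp only [pvNodes]; exact PySem.Set.nodup_ofList _)

theorem pvGraph_getD (l : List (String × String)) (g : PySem.Dict String (List String)) (v w : String) :
    w ∈ (l.foldl (fun g e => g.insert e.1 (g.getD e.1 [] ++ [e.2])) g).getD v []
      ↔ w ∈ g.getD v [] ∨ (v, w) ∈ l := by
  induction l generalizing g with
  | nil => simp
  | cons e l ih =>
    simp only [List.foldl_cons, ih, PySem.Dict.getD_insert, List.mem_cons]
    by_cases hv : v = e.1 <;> rcases e with ⟨a, b⟩ <;> subst_vars <;> simp <;> aesop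

theorem pvInnerA (ns : List String) (bfs : List String) (vis : PySem.Set String)
    (h1 : vis.Nodup) (h2 : bfs.Nodup) (h3 : ∀ x ∈ bfs, x ∈ vis) :
    (ns.foldl pvVisitA (bfs, vis)).2.Nodup ∧
    (ns.foldl pvVisitA (bfs, vis)).1.Nodup ∧
    (∀ x ∈ (ns.foldl pvVisitA (bfs, vis)).1, x ∈ (ns.foldl pvVisitA (bfs, vis)).2) ∧
    (∀ x, x ∈ (ns.foldl pvVisitA (bfs, vis)).2 ↔ x ∈ vis ∨ x ∈ ns) ∧
    (∀ x ∈ bfs, x ∈ (ns.foldl pvVisitA (bfs, vis)).1) ∧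
    (∀ x ∈ (ns.foldl pvVisitA (bfs, vis)).2, x ∈ vis ∨ x ∈ (ns.foldl pvVisitA (bfs, vis)).1) ∧
    (ns.foldl pvVisitA (bfs, vis)).2.length + bfs.length
      = vis.length + (ns.foldl pvVisitA (bfs, vis)).1.length := by
  induction ns generalizing bfs vis with
  | nil => refine ⟨h1, h2, h3, by simp, by simp, fun x hx => Or.inl hx, by simp⟩
  | cons n ns ih =>
    by_cases hn : n ∈ vis
    · have hst : pvVisitA (bfs, vis) n = (bfs, vis) := by
        simp [pvVisitA, hn]
      obtain ⟨c1, c2, c3, c4, c5, c6, c7⟩ := ih bfs vis h1 h2 h3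
      refine ⟨?_, ?_, ?_, ?_, ?_, ?_, ?_⟩ <;> simp only [List.foldl_cons, hst]
      · exact c1
      · exact c2
      · exact c3
      · intro x
        rw [c4]
        constructor
        · rintro (h | h); exacts [Or.inl h, Or.inr (List.mem_cons_of_mem _ h)]
        · rintro (h | h)
          · exact Or.inl h
          · rcases List.mem_cons.mp h with rfl | h
            exacts [Or.inl hn, Or.inr h]
      · exact c5
      · exact c6
      · exact c7
    · have hnb : n ∉ bfs := fun h => hn (h3 n h)
      have hst : pvVisitA (bfs, vis) n = (bfs ++ [n], PySem.Set.add vis n) := by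
        simp [pvVisitA, hn]
      have hadd : PySem.Set.add vis n = vis ++ [n] := PySem.Set.add_of_not_mem hn
      have h1' : (PySem.Set.add vis n).Nodup := PySem.Set.nodup_add vis n h1
      have h2' : (bfs ++ [n]).Nodup := by
        simp [List.nodup_append, h2]; intro a ha h; exact hnb (h ▸ ha)
      have h3' : ∀ x ∈ bfs ++ [n], x ∈ PySem.Set.add vis n := by
        intro x hx
        rw [PySem.Set.mem_add]
        rcases List.mem_append.mp hx with h | h
        · exact Or.inl (h3 x h)
        · exact Or.inr (List.mem_singleton.mp h)
      obtain ⟨c1, c2, c3, c4, c5, c6, c7⟩ := ih (bfs ++ [n]) (PySem.Set.add vis n) h1' h2' h3'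
      refine ⟨?_, ?_, ?_, ?_, ?_, ?_, ?_⟩ <;> simp only [List.foldl_cons, hst]
      · exact c1
      · exact c2
      · exact c3
      · intro x
        rw [c4, PySem.Set.mem_add]
        constructor
        · rintro ((h | rfl) | h)
          exacts [Or.inl h, Or.inr (List.mem_cons_self), Or.inr (List.mem_cons_of_mem _ h)]
        · rintro (h | h)
          · exact Or.inl (Or.inl h)
          · rcases List.mem_cons.mp h with rfl | h
            exacts [Or.inl (Or.inr rfl), Or.inr h]
      · intro x hx
        exact c5 x (List.mem_append.mpr (Or.inl hx))
      · intro x hx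
        rcases c6 x hx with h | h
        · rw [PySem.Set.mem_add] at h
          rcases h with h | rfl
          · exact Or.inl h
          · exact Or.inr (c5 x (by simp))
        · exact Or.inr h
      · have := c7
        rw [hadd] at this ⊢
        simp only [List.length_append, List.length_singleton] at this ⊢
        omega

theorem pvLoopA_char (P : List (String × String)) (g : PySem.Dict String (List String))
    (hg : ∀ v w, w ∈ g.getD v [] ↔ (v, w) ∈ P) :
    ∀ (fuel : Nat) (bfs : List String) (vis : PySem.Set String),
    vis.Nodup → "shiny gold" ∈ vis → bfs.Nodup → (∀ x ∈ bfs, x ∈ vis) →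
    (∀ x ∈ vis, pvReach P x) →
    (∀ u ∈ vis, u ∉ bfs → ∀ w, (u, w) ∈ P → w ∈ vis) →
    (∀ x ∈ vis, x ∈ "shiny gold" :: P.map Prod.snd) →
    bfs.length + (pvNodes P).length ≤ fuel + vis.length →
    (pvLoopA g fuel bfs vis).Nodup ∧ ∀ x, x ∈ pvLoopA g fuel bfs vis ↔ pvReach P x := by
  intro fuel
  induction fuel with
  | zero =>
    intro bfs vis h1 h2 h3 h4 h5 h6 h7 h8
    have hb : bfs = [] := by
      have := pvLen_le_nodes P vis h1 h7
      have : bfs.length = 0 := by omega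
      exact List.length_eq_zero_iff.mp this
    subst hb
    exact ⟨h1, pvClosed_char P vis h2 (fun u hu w hw => h6 u hu (by simp) w hw) h5⟩
  | succ fuel ih =>
    intro bfs vis h1 h2 h3 h4 h5 h6 h7 h8
    rcases List.eq_nil_or_concat bfs with hb | ⟨rest, v, hb⟩
    · subst hb
      have hstep : pvLoopA g (fuel + 1) [] vis = vis := by
        simp [pvLoopA, PySem.List.pop?]
      rw [hstep]
      exact ⟨h1, pvClosed_char P vis h2 (fun u hu w hw => h6 u hu (by simp) w hw) h5⟩
    · rw [List.concat_eq_append] at hb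
      subst hb
      have hstep : pvLoopA g (fuel + 1) (rest ++ [v]) vis
          = pvLoopA g fuel ((g.getD v []).foldl pvVisitA (rest, vis)).1 ((g.getD v []).foldl pvVisitA (rest, vis)).2 := by
        conv_lhs => rw [pvLoopA, PySem.List.pop?_last]
      rw [hstep]
      have hrn : rest.Nodup := (List.nodup_append.mp h3).1
      have hrv : ∀ x ∈ rest, x ∈ vis := fun x hx => h4 x (List.mem_append.mpr (Or.inl hx))
      have hvv : v ∈ vis := h4 v (by simp)
      obtain ⟨c1, c2, c3, c4, c5, c6, c7⟩ := pvInnerA (g.getD v []) rest vis h1 hrn hrv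
      set st := (g.getD v []).foldl pvVisitA (rest, vis) with hst
      refine ih st.1 st.2 c1 ((c4 _).mpr (Or.inl h2)) c2 c3 ?_ ?_ ?_ ?_
      · -- reach
        intro x hx
        rcases (c4 x).mp hx with h | h
        · exact h5 x h
        · exact pvReach.step (h5 v hvv) ((hg v x).mp h)
      · -- closedness
        intro u hu hub w hw
        have humem : u ∈ vis := by
          rcases c6 u hu with h | h
          · exact h
          · exact absurd h hub
        by_cases huv : u = v
        · subst huv
          exact (c4 w).mpr (Or.inr ((hg u w).mpr hw))
        · have : u ∉ rest ++ [v] := by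
            intro hmem
            rcases List.mem_append.mp hmem with h | h
            · exact hub (c5 u h)
            · exact huv (List.mem_singleton.mp h)
          exact (c4 w).mpr (Or.inl (h6 u humem this w hw))
      · -- nodes
        intro x hx
        rcases (c4 x).mp hx with h | h
        · exact h7 x h
        · exact List.mem_cons_of_mem _ (List.mem_map.mpr ⟨(v, x), (hg v x).mp h, rfl⟩)
      · -- fuel
        have hl : (rest ++ [v]).length = rest.length + 1 := by simp
        omega

theorem pvRoundB_aux (P : List (String × String)) (vis : PySem.Set String) (acc : PySem.Set String)
    (hnd : acc.Nodup) :
    (P.foldl (fun acc e => if vis.contains e.1 && !vis.contains e.2 then PySem.Set.add acc e.2 else acc) acc).Nodup ∧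
    ∀ x, x ∈ P.foldl (fun acc e => if vis.contains e.1 && !vis.contains e.2 then PySem.Set.add acc e.2 else acc) acc
      ↔ x ∈ acc ∨ ∃ e ∈ P, e.2 = x ∧ e.1 ∈ vis ∧ x ∉ vis := by
  induction P generalizing acc with
  | nil => exact ⟨hnd, by simp⟩
  | cons e P ih =>
    simp only [List.foldl_cons]
    by_cases hc : e.1 ∈ vis ∧ e.2 ∉ vis
    · have hcond : (vis.contains e.1 && !vis.contains e.2) = true := by
        simp [hc.1, hc.2]
      simp only [hcond, if_true]
      obtain ⟨c1, c2⟩ := ih (PySem.Set.add acc e.2) (PySem.Set.nodup_add acc e.2 hnd)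
      refine ⟨c1, fun x => ?_⟩
      rw [c2 x, PySem.Set.mem_add]
      constructor
      · rintro ((h | rfl) | ⟨f, hf, rfl, h1, h2⟩)
        · exact Or.inl h
        · exact Or.inr ⟨e, by simp, rfl, hc.1, hc.2⟩
        · exact Or.inr ⟨f, List.mem_cons_of_mem _ hf, rfl, h1, h2⟩
      · rintro (h | ⟨f, hf, rfl, h1, h2⟩)
        · exact Or.inl (Or.inl h)
        · rcases List.mem_cons.mp hf with rfl | hf
          · exact Or.inl (Or.inr rfl)
          · exact Or.inr ⟨f, hf, rfl, h1, h2⟩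
    · have hcond : (vis.contains e.1 && !vis.contains e.2) = false := by
        rcases not_and_or.mp hc with h | h
        · simp [h]
        · simp [not_not.mp h]
      simp only [hcond, Bool.false_eq_true, if_false]
      obtain ⟨c1, c2⟩ := ih acc hnd
      refine ⟨c1, fun x => ?_⟩
      rw [c2 x]
      constructor
      · rintro (h | ⟨f, hf, rfl, h1, h2⟩)
        · exact Or.inl h
        · exact Or.inr ⟨f, List.mem_cons_of_mem _ hf, rfl, h1, h2⟩
      · rintro (h | ⟨f, hf, rfl, h1, h2⟩)
        · exact Or.inl h
        · rcases List.mem_cons.mp hf with rfl | hf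
          · exact absurd ⟨h1, h2⟩ hc
          · exact Or.inr ⟨f, hf, rfl, h1, h2⟩

theorem pvRoundB_mem (P : List (String × String)) (vis : PySem.Set String) (x : String) :
    x ∈ pvRoundB P vis ↔ ∃ e ∈ P, e.2 = x ∧ e.1 ∈ vis ∧ x ∉ vis := by
  have := (pvRoundB_aux P vis PySem.Set.empty (by simp [PySem.Set.empty])).2 x
  simpa [pvRoundB, PySem.Set.empty] using this

theorem pvLoopB_char (P : List (String × String)) :
    ∀ (fuel : Nat) (vis : PySem.Set String),
    vis.Nodup → "shiny gold" ∈ vis →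
    (∀ x ∈ vis, pvReach P x) →
    (∀ x ∈ vis, x ∈ "shiny gold" :: P.map Prod.snd) →
    (pvNodes P).length + 1 ≤ fuel + vis.length →
    (pvLoopB P fuel vis).Nodup ∧ ∀ x, x ∈ pvLoopB P fuel vis ↔ pvReach P x := by
  intro fuel
  induction fuel with
  | zero =>
    intro vis h1 h2 h3 h4 h5
    have := pvLen_le_nodes P vis h1 h4
    omega
  | succ fuel ih =>
    intro vis h1 h2 h3 h4 h5
    by_cases hadd : pvRoundB P vis = []
    · have : pvLoopB P (fuel + 1) vis = vis := by
        simp [pvLoopB, hadd]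
      rw [this]
      refine ⟨h1, pvClosed_char P vis h2 ?_ h3⟩
      intro u hu w hw
      by_contra hwv
      have : w ∈ pvRoundB P vis := (pvRoundB_mem P vis w).mpr ⟨(u, w), hw, rfl, hu, hwv⟩
      rw [hadd] at this
      simp at this
    · have hstep : pvLoopB P (fuel + 1) vis = pvLoopB P fuel (PySem.Set.union vis (pvRoundB P vis)) := by
        simp [pvLoopB, hadd]
      rw [hstep]
      set add := pvRoundB P vis with hA
      set vis' := PySem.Set.union vis add with hV
      have hmemU : ∀ x, x ∈ vis' ↔ x ∈ vis ∨ x ∈ add := by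
        intro x; exact PySem.Set.mem_union vis add x
      have hnd' : vis'.Nodup := PySem.Set.nodup_union vis add h1
      -- length grows by at least one
      have hlen : vis.length + 1 ≤ vis'.length := by
        obtain ⟨a, ha⟩ := List.exists_mem_of_ne_nil _ hadd
        have hav : a ∉ vis := ((pvRoundB_mem P vis a).mp ha).choose_spec.2.2.2
        have : vis' = vis ++ (PySem.Set.ofList add).filter (fun y => !PySem.Set.contains vis y) := by
          rw [hV]; exact PySem.Set.update_eq_append_filter vis add
        rw [this, List.length_append]
        have haf : a ∈ (PySem.Set.ofList add).filter (fun y => !PySem.Set.contains vis y) := by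
          rw [List.mem_filter]
          exact ⟨(PySem.Set.mem_ofList add a).mpr ha, by simp [hav]⟩
        have := List.length_pos_of_mem haf
        omega
      refine ih vis' hnd' ((hmemU _).mpr (Or.inl h2)) ?_ ?_ (by omega)
      · intro x hx
        rcases (hmemU x).mp hx with h | h
        · exact h3 x h
        · obtain ⟨e, he, hex, h6, _⟩ := (pvRoundB_mem P vis x).mp h
          subst hex
          exact pvReach.step (h3 e.1 h6) (by simpa using he)
      · intro x hx
        rcases (hmemU x).mp hx with h | h
        · exact h4 x h
        · obtain ⟨e, he, rfl, _, _⟩ := (pvRoundB_mem P vis x).mp h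
          exact List.mem_cons_of_mem _ (List.mem_map.mpr ⟨e, he, rfl⟩)

-- ===== VERDICT (by name: the statement is the Claim_ definition above) =====
theorem compute_dfs_spec : Claim_equal_compute_dfs := by
  intro el _
  simp only [Spec_compute_dfs, compute_dfs, compute_dfs_alt]
  rw [List.flatMap_id']
  set P := el.flatten with hP
  have hgraph : el.foldl (fun g edges => edges.foldl (fun g e => g.insert e.1 (g.getD e.1 [] ++ [e.2])) g) PySem.Dict.empty
      = P.foldl (fun g e => g.insert e.1 (g.getD e.1 [] ++ [e.2])) PySem.Dict.empty :=
    List.foldl_flatten.symm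
  rw [hgraph]
  have hg : ∀ v w, w ∈ (P.foldl (fun g e => g.insert e.1 (g.getD e.1 [] ++ [e.2])) PySem.Dict.empty).getD v [] ↔ (v, w) ∈ P := by
    intro v w
    rw [pvGraph_getD]
    simp
  have hone : PySem.Set.ofList ["shiny gold"] = ["shiny gold"] := rfl
  have hbound : (pvNodes P).length ≤ P.length + 1 := by
    calc (pvNodes P).length ≤ ("shiny gold" :: P.map Prod.snd).length := PySem.Set.length_ofList_le _
      _ = P.length + 1 := by simp
  have hreach1 : ∀ x ∈ (["shiny gold"] : List String), pvReach P x := by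
    intro x hx
    rw [List.mem_singleton.mp hx]
    exact pvReach.gold
  obtain ⟨ndA, chA⟩ := pvLoopA_char P _ hg (P.length + 1) ["shiny gold"] (PySem.Set.ofList ["shiny gold"])
    (by rw [hone]; simp) (by rw [hone]; simp) (by simp) (by rw [hone]; simp)
    (by rw [hone]; exact hreach1)
    (by rw [hone]; intro u hu hub; exact absurd hu hub)
    (by rw [hone]; intro x hx; rw [List.mem_singleton.mp hx]; simp)
    (by rw [hone]; simp only [List.length_singleton]; omega)
  obtain ⟨ndB, chB⟩ := pvLoopB_char P (P.length + 1) (PySem.Set.ofList ["shiny gold"])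
    (by rw [hone]; simp) (by rw [hone]; simp)
    (by rw [hone]; exact hreach1)
    (by rw [hone]; intro x hx; rw [List.mem_singleton.mp hx]; simp)
    (by rw [hone]; simp only [List.length_singleton]; omega)
  have hperm := (List.perm_ext_iff_of_nodup ndA ndB).mpr (fun x => (chA x).trans (chB x).symm)
  rw [hperm.length_eq]
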